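-- pv_equiv track=rewrite | github.com/emilyyzhangg/AMP_LLMs | amp_llm_v3/standalone modules/agent_annotate/scripts/concordance_jobs.py | load_annotator_workload
-- ===== SOURCE A (Python) =====
-- WORKLOAD = {
--     "Trials Replicate 1": [
--         (1, 309, "Mercan"), (310, 617, "Maya"), (617, 822, "Anat"),
--         (823, 926, "Ali"), (926, 1186, "Emre"), (1187, 1417, "Iris"),
--         (1417, 1544, "Ali"), (1545, 1846, "Berke"),
--     ],
--     "Trials Replicate 2": [
--         (1, 461, "Emily"), (462, 480, "Anat"), (481, 922, "Emily"),
--         (923, 941, "Ali"), (941, 1383, "Emily"), (1384, 1405, "Iris"),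
--     ],
-- }
--
-- def load_annotator_workload(row_to_nct):
--     """Map each (sheet_name, nct_id) to an annotator name based on row ranges.
--
--     Returns: { sheet_name: { nct_id: annotator_name } }
--     """
--     result = {}
--     for sheet_name, ranges in WORKLOAD.items():
--         sheet_map = row_to_nct.get(sheet_name, {})
--         nct_to_annotator = {}
--         for start, end, annotator in ranges:
--             for row_num in range(start, end + 1):
--                 nct = sheet_map.get(row_num)
--                 if nct:
--                     nct_to_annotator[nct] = annotator
--         result[sheet_name] = nct_to_annotator
--     return result
-- ===== SOURCE B (Python) =====
-- WORKLOAD = {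
--     "Trials Replicate 1": [
--         (1, 309, "Mercan"), (310, 617, "Maya"), (617, 822, "Anat"),
--         (823, 926, "Ali"), (926, 1186, "Emre"), (1187, 1417, "Iris"),
--         (1417, 1544, "Ali"), (1545, 1846, "Berke"),
--     ],
--     "Trials Replicate 2": [
--         (1, 461, "Emily"), (462, 480, "Anat"), (481, 922, "Emily"),
--         (923, 941, "Ali"), (941, 1383, "Emily"), (1384, 1405, "Iris"),
--     ],
-- }
--
--
-- def _annotator_for(ranges, row):
--     """Annotator of the LAST range covering row (later ranges override), else None."""
--     for start, end, annotator in reversed(ranges):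
--         if start <= row <= end:
--             return annotator
--     return None
--
--
-- def _sheet_assignments(ranges, sheet_map):
--     """Walk the sheet's actual rows in ascending order; look each row's range up."""
--     nct_to_annotator = {}
--     for row in sorted(sheet_map):
--         nct = sheet_map.get(row)
--         if nct:
--             annotator = _annotator_for(ranges, row)
--             if annotator is not None:
--                 nct_to_annotator[nct] = annotator
--     return nct_to_annotator
--
--
-- def load_annotator_workload(row_to_nct):
--     """Map each (sheet_name, nct_id) to an annotator name based on row ranges.
--
--     Returns: { sheet_name: { nct_id: annotator_name } }
--     """
--     return {sheet: _sheet_assignments(ranges, row_to_nct.get(sheet, {}))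
--             for sheet, ranges in WORKLOAD.items()}
-- ===== Notes on version B (the rewrite author's own statement) =====
-- stated objective: alternative
-- what changed: Instead of enumerating every row number of every WORKLOAD range and probing the sheet dict per row, B iterates the sheet's actual rows in sorted ascending order and finds each row's annotator by a reverse scan of the (at most 8) ranges, so work scales with the sheet's data rather than with the fixed ~3251 range rows.
import Mathlib
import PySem

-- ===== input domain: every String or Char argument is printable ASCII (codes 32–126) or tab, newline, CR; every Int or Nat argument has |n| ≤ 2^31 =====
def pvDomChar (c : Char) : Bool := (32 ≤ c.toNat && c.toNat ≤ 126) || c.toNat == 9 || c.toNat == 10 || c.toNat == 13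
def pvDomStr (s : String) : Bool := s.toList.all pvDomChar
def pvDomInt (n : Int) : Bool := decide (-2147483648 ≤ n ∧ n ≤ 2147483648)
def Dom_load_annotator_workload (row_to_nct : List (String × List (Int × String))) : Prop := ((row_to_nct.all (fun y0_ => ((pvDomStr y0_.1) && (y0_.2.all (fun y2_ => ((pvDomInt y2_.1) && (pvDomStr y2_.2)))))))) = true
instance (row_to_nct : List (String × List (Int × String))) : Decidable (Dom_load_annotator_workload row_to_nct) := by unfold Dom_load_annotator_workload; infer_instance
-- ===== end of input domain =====

-- B iterates the sheet's actual rows (sorted ascending) and finds each row's range by a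
-- reverse scan of the (few) WORKLOAD ranges, instead of enumerating every row of every range.

-- ===== PORT A =====
-- the module constant WORKLOAD (each triple is (start, end, annotator))
def pvR1 : List (Int × Int × String) :=
  [(1, 309, "Mercan"), (310, 617, "Maya"), (617, 822, "Anat"),
   (823, 926, "Ali"), (926, 1186, "Emre"), (1187, 1417, "Iris"),
   (1417, 1544, "Ali"), (1545, 1846, "Berke")]
def pvR2 : List (Int × Int × String) :=
  [(1, 461, "Emily"), (462, 480, "Anat"), (481, 922, "Emily"),
   (923, 941, "Ali"), (941, 1383, "Emily"), (1384, 1405, "Iris")]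
def pvWORKLOAD : List (String × List (Int × Int × String)) :=
  [("Trials Replicate 1", pvR1), ("Trials Replicate 2", pvR2)]

def load_annotator_workload (row_to_nct : List (String × List (Int × String))) : List (String × List (String × String)) :=
  ((pvWORKLOAD.foldl
    (fun (result : PySem.Dict String (PySem.Dict String String)) sheet =>
      let sheet_map : PySem.Dict Int String := PySem.Dict.mk ((PySem.Dict.mk row_to_nct).getD sheet.1 [])
      let nct_to_annotator : PySem.Dict String String :=
        sheet.2.foldl
          (fun d rge =>
            (PySem.List.pyRange rge.1 (rge.2.1 + 1)).foldl
              (fun d row_num =>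
                match sheet_map.get? row_num with
                | some nct => if nct ≠ "" then d.insert nct rge.2.2 else d
                | none => d)
              d)
          PySem.Dict.empty
      result.insert sheet.1 nct_to_annotator)
    PySem.Dict.empty).items).map (fun p => (p.1, p.2.items))

-- ===== PORT B =====
-- helper _annotator_for: scan the ranges in reverse, first hit wins ('return'), else None
def pvScan : List (Int × Int × String) → Int → Option String
  | [], _ => none
  | (s, e, a) :: rest, row => if s ≤ row ∧ row ≤ e then some a else pvScan rest row

def pvSheetAssign (ranges : List (Int × Int × String)) (sheet_map_pairs : List (Int × String)) : PySem.Dict String String :=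
  let sheet_map : PySem.Dict Int String := PySem.Dict.mk sheet_map_pairs
  (PySem.List.sorted sheet_map.keys (fun x => x)).foldl
    (fun d row =>
      match sheet_map.get? row with
      | some nct =>
        if nct ≠ "" then
          match pvScan ranges.reverse row with
          | some annotator => d.insert nct annotator
          | none => d
        else d
      | none => d)
    PySem.Dict.empty

def load_annotator_workload_alt (row_to_nct : List (String × List (Int × String))) : List (String × List (String × String)) :=
  ((pvWORKLOAD.foldl
    (fun (result : PySem.Dict String (PySem.Dict String String)) sheet =>
      result.insert sheet.1 (pvSheetAssign sheet.2 ((PySem.Dict.mk row_to_nct).getD sheet.1 [])))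
    PySem.Dict.empty).items).map (fun p => (p.1, p.2.items))

-- ===== PRECONDITION & SPEC =====
-- Pre_ excludes association lists giving a sheet duplicate row keys: such lists do not encode a
-- Python dict (whose keys are distinct), and which duplicate wins is an accident of the encoding.
def Pre_load_annotator_workload (row_to_nct : List (String × List (Int × String))) : Prop :=
  ∀ p ∈ row_to_nct, (p.2.map Prod.fst).Nodup
instance (row_to_nct : List (String × List (Int × String))) : Decidable (Pre_load_annotator_workload row_to_nct) := by unfold Pre_load_annotator_workload; infer_instance
def pvWitness_load_annotator_workload : (List (String × List (Int × String))) :=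
  [("Trials Replicate 1", [(1, "NCT001"), (310, "NCT002"), (617, "NCT003"), (2000, "NCT004"), (5, "")])]

def Spec_load_annotator_workload (row_to_nct : List (String × List (Int × String))) (out : List (String × List (String × String))) : Prop := out = load_annotator_workload_alt row_to_nct
instance (row_to_nct : List (String × List (Int × String))) (out : List (String × List (String × String))) : Decidable (Spec_load_annotator_workload row_to_nct out) := by unfold Spec_load_annotator_workload; infer_instance

-- ===== CLAIM (what is proved, stated in full; the proofs are below) =====
def Claim_equal_load_annotator_workload : Prop := ∀ (row_to_nct : List (String × List (Int × String))), Dom_load_annotator_workload row_to_nct → Pre_load_annotator_workload row_to_nct → Spec_load_annotator_workload row_to_nct (load_annotator_workload row_to_nct)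

-- ===== LEMMAS AND PROOFS =====

-- the A-side inner step: one visited row with the current range's annotator
def pvStepA (m : PySem.Dict Int String) (a : String) (d : PySem.Dict String String) (row : Int) : PySem.Dict String String :=
  match m.get? row with
  | some nct => if nct ≠ "" then d.insert nct a else d
  | none => d

-- the B-side inner step: one actual row, annotator found by pvScan over the reversed ranges
def pvStepB (m : PySem.Dict Int String) (ranges : List (Int × Int × String)) (d : PySem.Dict String String) (row : Int) : PySem.Dict String String :=
  match m.get? row with
  | some nct =>
    if nct ≠ "" then
      match pvScan ranges.reverse row with
      | some annotator => d.insert nct annotator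
      | none => d
    else d
  | none => d

def pvInnerA (m : PySem.Dict Int String) (ranges : List (Int × Int × String)) : PySem.Dict String String :=
  ranges.foldl (fun d r => (PySem.List.pyRange r.1 (r.2.1 + 1)).foldl (pvStepA m r.2.2) d) PySem.Dict.empty

def pvInnerB (m : PySem.Dict Int String) (ranges : List (Int × Int × String)) : PySem.Dict String String :=
  (PySem.List.sorted m.keys (fun x => x)).foldl (pvStepB m ranges) PySem.Dict.empty

def pvM (row_to_nct : List (String × List (Int × String))) (s : String) : PySem.Dict Int String :=
  PySem.Dict.mk ((PySem.Dict.mk row_to_nct).getD s [])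

-- WORKLOAD ranges with the overlapping boundary row removed from the EARLIER range
def pvR1' : List (Int × Int × String) :=
  [(1, 309, "Mercan"), (310, 616, "Maya"), (617, 822, "Anat"),
   (823, 925, "Ali"), (926, 1186, "Emre"), (1187, 1416, "Iris"),
   (1417, 1544, "Ali"), (1545, 1846, "Berke")]
def pvR2' : List (Int × Int × String) :=
  [(1, 461, "Emily"), (462, 480, "Anat"), (481, 922, "Emily"),
   (923, 940, "Ali"), (941, 1383, "Emily"), (1384, 1405, "Iris")]

def pvKeep (m : PySem.Dict Int String) (ranges : List (Int × Int × String)) (row : Int) : Bool :=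
  (match m.get? row with | some nct => nct != "" | none => false) && (pvScan ranges.reverse row).isSome

lemma pvPortA_eq (rtn : List (String × List (Int × String))) :
    load_annotator_workload rtn =
      [("Trials Replicate 1", (pvInnerA (pvM rtn "Trials Replicate 1") pvR1).items),
       ("Trials Replicate 2", (pvInnerA (pvM rtn "Trials Replicate 2") pvR2).items)] := rfl

lemma pvPortB_eq (rtn : List (String × List (Int × String))) :
    load_annotator_workload_alt rtn =
      [("Trials Replicate 1", (pvInnerB (pvM rtn "Trials Replicate 1") pvR1).items),
       ("Trials Replicate 2", (pvInnerB (pvM rtn "Trials Replicate 2") pvR2).items)] := rfl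

lemma pvStepA_absorb (m : PySem.Dict Int String) (a1 a2 : String) (d : PySem.Dict String String) (r : Int) :
    pvStepA m a2 (pvStepA m a1 d r) r = pvStepA m a2 d r := by
  unfold pvStepA
  cases h : m.get? r with
  | none => simp
  | some nct => by_cases hn : nct = "" <;> simp [hn, PySem.Dict.insert_insert_self]

-- trimming the shared boundary row out of the earlier of two touching ranges
lemma pvMerge (m : PySem.Dict Int String) (a1 a2 : String) (s1 e1 e2 : Int)
    (h1 : s1 ≤ e1) (h2 : e1 ≤ e2) (d : PySem.Dict String String) :
    (PySem.List.pyRange e1 (e2 + 1)).foldl (pvStepA m a2) ((PySem.List.pyRange s1 (e1 + 1)).foldl (pvStepA m a1) d)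
    = (PySem.List.pyRange e1 (e2 + 1)).foldl (pvStepA m a2) ((PySem.List.pyRange s1 e1).foldl (pvStepA m a1) d) := by
  rw [PySem.List.pyRange_one_succ_right h1, List.foldl_append,
      PySem.List.pyRange_one_cons (show e1 < e2 + 1 by omega)]
  simp only [List.foldl_cons, List.foldl_nil]
  rw [pvStepA_absorb]

lemma pvTrim1 (m : PySem.Dict Int String) : pvInnerA m pvR1 = pvInnerA m pvR1' := by
  have M1 : ∀ d, (PySem.List.pyRange 617 823).foldl (pvStepA m "Anat") ((PySem.List.pyRange 310 618).foldl (pvStepA m "Maya") d)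
      = (PySem.List.pyRange 617 823).foldl (pvStepA m "Anat") ((PySem.List.pyRange 310 617).foldl (pvStepA m "Maya") d) := by
    intro d; have h := pvMerge m "Maya" "Anat" 310 617 822 (by norm_num) (by norm_num) d; norm_num at h; exact h
  have M2 : ∀ d, (PySem.List.pyRange 926 1187).foldl (pvStepA m "Emre") ((PySem.List.pyRange 823 927).foldl (pvStepA m "Ali") d)
      = (PySem.List.pyRange 926 1187).foldl (pvStepA m "Emre") ((PySem.List.pyRange 823 926).foldl (pvStepA m "Ali") d) := by
    intro d; have h := pvMerge m "Ali" "Emre" 823 926 1186 (by norm_num) (by norm_num) d; norm_num at h; exact h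
  have M3 : ∀ d, (PySem.List.pyRange 1417 1545).foldl (pvStepA m "Ali") ((PySem.List.pyRange 1187 1418).foldl (pvStepA m "Iris") d)
      = (PySem.List.pyRange 1417 1545).foldl (pvStepA m "Ali") ((PySem.List.pyRange 1187 1417).foldl (pvStepA m "Iris") d) := by
    intro d; have h := pvMerge m "Iris" "Ali" 1187 1417 1544 (by norm_num) (by norm_num) d; norm_num at h; exact h
  simp only [pvInnerA, pvR1, pvR1', List.foldl_cons, List.foldl_nil]
  norm_num
  rw [M1, M2, M3]

lemma pvTrim2 (m : PySem.Dict Int String) : pvInnerA m pvR2 = pvInnerA m pvR2' := by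
  have M1 : ∀ d, (PySem.List.pyRange 941 1384).foldl (pvStepA m "Emily") ((PySem.List.pyRange 923 942).foldl (pvStepA m "Ali") d)
      = (PySem.List.pyRange 941 1384).foldl (pvStepA m "Emily") ((PySem.List.pyRange 923 941).foldl (pvStepA m "Ali") d) := by
    intro d; have h := pvMerge m "Ali" "Emily" 923 941 1383 (by norm_num) (by norm_num) d; norm_num at h; exact h
  simp only [pvInnerA, pvR2, pvR2', List.foldl_cons, List.foldl_nil]
  norm_num
  rw [M1]

lemma pvStepB_skip (m : PySem.Dict Int String) (ranges : List (Int × Int × String)) (row : Int)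
    (h : pvKeep m ranges row = false) (d : PySem.Dict String String) : pvStepB m ranges d row = d := by
  unfold pvKeep at h
  unfold pvStepB
  cases hg : m.get? row with
  | none => simp
  | some nct =>
    rw [hg] at h
    simp only [Bool.and_eq_false_iff] at h
    rcases h with h | h
    · simp only [bne_eq_false_iff_eq] at h
      simp [h]
    · cases hs : pvScan ranges.reverse row with
      | none => simp
      | some a => rw [hs] at h; simp at h

lemma pvFoldB_filter (m : PySem.Dict Int String) (ranges : List (Int × Int × String))
    (l : List Int) (init : PySem.Dict String String) :
    l.foldl (pvStepB m ranges) init = (l.filter (pvKeep m ranges)).foldl (pvStepB m ranges) init := by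
  rw [← PySem.List.foldl_if_eq_foldl_filter (pvKeep m ranges) (pvStepB m ranges)]
  apply PySem.List.foldl_congr_mem
  intro acc x _
  by_cases h : pvKeep m ranges x = true
  · simp [h]
  · simp only [Bool.not_eq_true] at h
    simp [h, pvStepB_skip m ranges x h]

-- the generic per-sheet equivalence, for trimmed (disjoint, ascending, [lo,hi]-covering) ranges
lemma pvSheet (ranges ranges' : List (Int × Int × String)) (lo hi : Int)
    (m : PySem.Dict Int String) (hnd : m.keys.Nodup)
    (hcov : ∀ r ∈ ranges', ∀ row : Int, r.1 ≤ row → row ≤ r.2.1 → pvScan ranges.reverse row = some r.2.2)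
    (hflat : (ranges'.map (fun r => PySem.List.pyRange r.1 (r.2.1 + 1))).flatten = PySem.List.pyRange lo (hi + 1))
    (hbound : ∀ row : Int, (pvScan ranges.reverse row).isSome → lo ≤ row ∧ row ≤ hi) :
    pvInnerA m ranges' = pvInnerB m ranges := by
  have step1 : pvInnerA m ranges' =
      ranges'.foldl (fun d r => (PySem.List.pyRange r.1 (r.2.1 + 1)).foldl (pvStepB m ranges) d) PySem.Dict.empty := by
    unfold pvInnerA
    apply PySem.List.foldl_congr_mem
    intro acc r hr
    apply PySem.List.foldl_congr_mem
    intro d row hrow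
    have hb := (PySem.List.mem_pyRange_one).1 hrow
    have hc := hcov r hr row hb.1 (by omega)
    unfold pvStepA pvStepB
    rw [hc]
  have step2 : ranges'.foldl (fun d r => (PySem.List.pyRange r.1 (r.2.1 + 1)).foldl (pvStepB m ranges) d) PySem.Dict.empty
      = (PySem.List.pyRange lo (hi + 1)).foldl (pvStepB m ranges) PySem.Dict.empty := by
    rw [← hflat, List.foldl_flatten, List.foldl_map]
  have hlist : (PySem.List.pyRange lo (hi + 1)).filter (pvKeep m ranges)
      = (PySem.List.sorted m.keys (fun x => x)).filter (pvKeep m ranges) := by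
    have nd1 : ((PySem.List.pyRange lo (hi + 1)).filter (pvKeep m ranges)).Nodup :=
      (PySem.List.nodup_pyRange_one _ _).filter _
    have hsortnd : (PySem.List.sorted m.keys (fun x => x)).Nodup :=
      ((PySem.List.sorted_perm m.keys (fun x => x) false).nodup_iff).mpr hnd
    have nd2 : ((PySem.List.sorted m.keys (fun x => x)).filter (pvKeep m ranges)).Nodup :=
      hsortnd.filter _
    have hperm : ((PySem.List.pyRange lo (hi + 1)).filter (pvKeep m ranges)).Perm
        ((PySem.List.sorted m.keys (fun x => x)).filter (pvKeep m ranges)) := by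
      rw [List.perm_ext_iff_of_nodup nd1 nd2]
      intro a
      simp only [List.mem_filter]
      constructor
      · rintro ⟨_, hk⟩
        refine ⟨?_, hk⟩
        rw [(PySem.List.sorted_perm m.keys (fun x => x) false).mem_iff]
        unfold pvKeep at hk
        cases hg : m.get? a with
        | none => rw [hg] at hk; simp at hk
        | some nct =>
          by_contra hmem
          rw [(PySem.Dict.get?_eq_none_iff_not_mem_keys m a).mpr hmem] at hg
          simp at hg
      · rintro ⟨_, hk⟩
        refine ⟨?_, hk⟩
        rw [PySem.List.mem_pyRange_one]
        unfold pvKeep at hk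
        have hs : (pvScan ranges.reverse a).isSome := (Bool.and_eq_true_iff.mp hk).2
        have := hbound a hs
        omega
    exact hperm.eq_of_pairwise (fun a b _ _ h1 h2 => le_antisymm h1 h2)
      (((PySem.List.pairwise_lt_pyRange_one lo (hi + 1)).imp le_of_lt).filter _)
      (((PySem.List.sorted_pairwise m.keys (fun x => x)).imp id).filter _)
  rw [step1, step2, pvFoldB_filter, hlist, ← pvFoldB_filter]
  rfl

set_option maxHeartbeats 1000000 in
lemma pvCov1 : ∀ r ∈ pvR1', ∀ row : Int, r.1 ≤ row → row ≤ r.2.1 → pvScan pvR1.reverse row = some r.2.2 := by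
  have hrev : pvR1.reverse = [(1545, 1846, "Berke"), (1417, 1544, "Ali"), (1187, 1417, "Iris"),
    (926, 1186, "Emre"), (823, 926, "Ali"), (617, 822, "Anat"), (310, 617, "Maya"), (1, 309, "Mercan")] := rfl
  intro r hr row h1 h2
  rw [hrev]
  simp only [pvR1', List.mem_cons, List.not_mem_nil, or_false] at hr
  rcases hr with rfl | rfl | rfl | rfl | rfl | rfl | rfl | rfl <;> dsimp only at h1 h2 <;>
    simp only [pvScan] <;> (split_ifs <;> first | rfl | omega)

set_option maxHeartbeats 1000000 in
lemma pvCov2 : ∀ r ∈ pvR2', ∀ row : Int, r.1 ≤ row → row ≤ r.2.1 → pvScan pvR2.reverse row = some r.2.2 := by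
  have hrev : pvR2.reverse = [(1384, 1405, "Iris"), (941, 1383, "Emily"), (923, 941, "Ali"),
    (481, 922, "Emily"), (462, 480, "Anat"), (1, 461, "Emily")] := rfl
  intro r hr row h1 h2
  rw [hrev]
  simp only [pvR2', List.mem_cons, List.not_mem_nil, or_false] at hr
  rcases hr with rfl | rfl | rfl | rfl | rfl | rfl <;> dsimp only at h1 h2 <;>
    simp only [pvScan] <;> (split_ifs <;> first | rfl | omega)

lemma pvBound1 : ∀ row : Int, (pvScan pvR1.reverse row).isSome → 1 ≤ row ∧ row ≤ 1846 := by
  intro row h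
  have hrev : pvR1.reverse = [(1545, 1846, "Berke"), (1417, 1544, "Ali"), (1187, 1417, "Iris"),
    (926, 1186, "Emre"), (823, 926, "Ali"), (617, 822, "Anat"), (310, 617, "Maya"), (1, 309, "Mercan")] := rfl
  rw [hrev] at h
  simp only [pvScan] at h
  split_ifs at h <;> (try simp at h) <;> omega

lemma pvBound2 : ∀ row : Int, (pvScan pvR2.reverse row).isSome → 1 ≤ row ∧ row ≤ 1405 := by
  intro row h
  have hrev : pvR2.reverse = [(1384, 1405, "Iris"), (941, 1383, "Emily"), (923, 941, "Ali"),
    (481, 922, "Emily"), (462, 480, "Anat"), (1, 461, "Emily")] := rfl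
  rw [hrev] at h
  simp only [pvScan] at h
  split_ifs at h <;> (try simp at h) <;> omega

lemma pvFlat1 : (pvR1'.map (fun r => PySem.List.pyRange r.1 (r.2.1 + 1))).flatten = PySem.List.pyRange 1 1847 := by
  simp only [pvR1', List.map_cons, List.map_nil, List.flatten_cons, List.flatten_nil, List.append_nil]
  norm_num
  rw [PySem.List.pyRange_one_append 1 310 1847 (by norm_num) (by norm_num),
      PySem.List.pyRange_one_append 310 617 1847 (by norm_num) (by norm_num),
      PySem.List.pyRange_one_append 617 823 1847 (by norm_num) (by norm_num),
      PySem.List.pyRange_one_append 823 926 1847 (by norm_num) (by norm_num),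
      PySem.List.pyRange_one_append 926 1187 1847 (by norm_num) (by norm_num),
      PySem.List.pyRange_one_append 1187 1417 1847 (by norm_num) (by norm_num),
      PySem.List.pyRange_one_append 1417 1545 1847 (by norm_num) (by norm_num)]

lemma pvFlat2 : (pvR2'.map (fun r => PySem.List.pyRange r.1 (r.2.1 + 1))).flatten = PySem.List.pyRange 1 1406 := by
  simp only [pvR2', List.map_cons, List.map_nil, List.flatten_cons, List.flatten_nil, List.append_nil]
  norm_num
  rw [PySem.List.pyRange_one_append 1 462 1406 (by norm_num) (by norm_num),
      PySem.List.pyRange_one_append 462 481 1406 (by norm_num) (by norm_num),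
      PySem.List.pyRange_one_append 481 923 1406 (by norm_num) (by norm_num),
      PySem.List.pyRange_one_append 923 941 1406 (by norm_num) (by norm_num),
      PySem.List.pyRange_one_append 941 1384 1406 (by norm_num) (by norm_num)]

lemma pvM_nodup (rtn : List (String × List (Int × String))) (hpre : Pre_load_annotator_workload rtn) (s : String) :
    (pvM rtn s).keys.Nodup := by
  unfold pvM
  rw [PySem.Dict.keys_mk, PySem.Dict.getD_eq_get?_getD]
  cases hg : (PySem.Dict.mk rtn).get? s with
  | none => simp
  | some v =>
    exact hpre (s, v) (PySem.Dict.mem_items_of_get?_eq_some _ hg)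

-- ===== VERDICT (by name: the statement is the Claim_ definition above) =====
theorem load_annotator_workload_spec : Claim_equal_load_annotator_workload := by
  intro rtn _hdom hpre
  unfold Spec_load_annotator_workload
  rw [pvPortA_eq, pvPortB_eq]
  rw [pvTrim1, pvTrim2,
      pvSheet pvR1 pvR1' 1 1846 _ (pvM_nodup rtn hpre _) pvCov1 pvFlat1 pvBound1,
      pvSheet pvR2 pvR2' 1 1405 _ (pvM_nodup rtn hpre _) pvCov2 pvFlat2 pvBound2]
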